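-- pv_equiv track=rewrite | github.com/newfull5/Programmers | 라면공장.py | solution
-- ===== SOURCE A (Python) =====
-- import heapq
--
-- def solution(stock, dates, supplies, k):
--     heap = []
--     cnt = 0
--     idx = 0
--     while stock < k:
--         for i in range(idx,len(supplies)):
--             if dates[idx] > stock:
--                 break
--             heapq.heappush(heap,(-supplies[i],supplies[i]))
--             idx += 1
--         stock += heapq.heappop(heap)[1]
--         cnt += 1
--
--     return cnt
-- ===== SOURCE B (Python) =====
-- def solution(stock, dates, supplies, k):
--     cnt = 0
--     idx = 0
--     avail = []
--     while stock < k: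
--         # unlock every supply whose date has been reached
--         while idx < len(supplies) and dates[idx] <= stock:
--             avail.append(supplies[idx])
--             idx += 1
--         avail.sort(reverse=True)
--         # consume largest-first until the target is reached or a new supply unlocks
--         j = 0
--         while stock < k and not (idx < len(supplies) and dates[idx] <= stock):
--             stock += avail[j]  # IndexError when exhausted, as A's empty heappop
--             cnt += 1
--             j += 1
--         avail = avail[j:]
--     return cnt
-- ===== Notes on version B (the rewrite author's own statement) =====
-- stated objective: alternative
-- what changed: Replaces the incrementally maintained max-heap of (-supply, supply) pairs (one pop per round) by phase-staged batch processing: unlock the newly available supplies, sort the pool once descending, consume a prefix of it until the target is reached or a new date unlocks, and carry the sliced remainder to the next phase.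
-- outside the precondition, e.g. on solution(0, [0, 100], [10, 1], 5): A returns 1, B returns 1
import Mathlib
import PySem

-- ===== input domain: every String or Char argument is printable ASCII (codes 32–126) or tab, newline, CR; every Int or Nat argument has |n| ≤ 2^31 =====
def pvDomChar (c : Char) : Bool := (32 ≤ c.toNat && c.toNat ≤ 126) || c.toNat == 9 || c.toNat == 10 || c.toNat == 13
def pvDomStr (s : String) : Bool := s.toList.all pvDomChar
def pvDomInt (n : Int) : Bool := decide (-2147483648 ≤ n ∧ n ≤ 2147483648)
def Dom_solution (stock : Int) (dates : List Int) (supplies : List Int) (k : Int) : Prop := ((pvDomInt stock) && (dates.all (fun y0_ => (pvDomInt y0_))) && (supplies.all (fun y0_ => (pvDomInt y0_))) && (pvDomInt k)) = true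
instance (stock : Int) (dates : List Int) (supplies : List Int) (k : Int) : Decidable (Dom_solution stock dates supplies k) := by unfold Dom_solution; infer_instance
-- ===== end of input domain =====

-- B replaces A's per-round max-heap greedy by phase-staged processing: unlock a batch, sort it
-- once descending, consume a prefix until the target or the next unlock, carry the sliced
-- remainder (objective: alternative).

-- ===== PORT A =====
-- Python tuple comparison (lexicographic) on the (−supply, supply) pairs A pushes.
def pleLex (a b : Int × Int) : Bool := a.1 < b.1 || (a.1 == b.1 && a.2 ≤ b.2)

-- heapq is a standard-library call: it is ported by its observable contract — the heap is the
-- multiset of pushed pairs (heappush = append) and heappop removes the lexicographically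
-- smallest pair (returning `none` on an empty heap = Python's IndexError).
def popMinPair : List (Int × Int) → Option ((Int × Int) × List (Int × Int))
  | [] => none
  | p :: ps =>
    match popMinPair ps with
    | none => some (p, [])
    | some (q, rest) => if pleLex p q then some (p, ps) else some (q, p :: rest)

-- the inner `for i in range(idx, len(supplies))` loop; `none` = IndexError on dates[idx]
def innerA (dates supplies : List Int) (stock : Int) (i idx : Nat) (heap : List (Int × Int)) :
    Option (Nat × List (Int × Int)) :=
  if h : i < supplies.length then
    match dates[idx]? with
    | none => none
    | some d =>
      if d > stock then some (idx, heap)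
      else innerA dates supplies stock (i + 1) (idx + 1) (heap ++ [(-supplies[i], supplies[i])])
  else some (idx, heap)
termination_by supplies.length - i

-- the outer `while stock < k` loop; fuel is an upper bound on its iteration count
-- (each iteration pops one pushed pair, and at most supplies.length pairs are ever pushed)
def whileA (fuel : Nat) (stock : Int) (dates supplies : List Int) (k : Int) (cnt : Int)
    (idx : Nat) (heap : List (Int × Int)) : Option Int :=
  match fuel with
  | 0 => none
  | f + 1 =>
    if stock < k then
      match innerA dates supplies stock idx idx heap with
      | none => none
      | some (idx', heap') =>
        match popMinPair heap' with
        | none => none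
        | some (q, heap'') => whileA f (stock + q.2) dates supplies k (cnt + 1) idx' heap''
    else some cnt

def solution (stock : Int) (dates : List Int) (supplies : List Int) (k : Int) : Int :=
  (whileA (supplies.length + 1) stock dates supplies k 0 0 []).getD 0

-- ===== PORT B =====
-- Source B's `idx < len(supplies) and dates[idx] <= stock` (short-circuit; `none` = IndexError)
def pendingB (dates supplies : List Int) (stock : Int) (idx : Nat) : Option Bool :=
  if idx < supplies.length then
    match dates[idx]? with
    | none => none
    | some d => some (decide (d ≤ stock))
  else some false

-- Source B's unlock loop `while idx < len(supplies) and dates[idx] <= stock: avail.append(...)`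
def innerB (dates supplies : List Int) (stock : Int) (idx : Nat) (avail : List Int) :
    Option (Nat × List Int) :=
  if h : idx < supplies.length then
    match dates[idx]? with
    | none => none
    | some d =>
      if d ≤ stock then innerB dates supplies stock (idx + 1) (avail ++ [supplies[idx]])
      else some (idx, avail)
  else some (idx, avail)
termination_by supplies.length - idx

-- Source B's consume loop `while stock < k and not (...): stock += avail[j]; cnt += 1; j += 1`;
-- `none` = IndexError (on avail[j] or on dates[idx] inside the condition)
def consumeB (dates supplies s : List Int) (k : Int) (idx : Nat) (j : Nat) (stock cnt : Int) :
    Option (Int × Int × Nat) :=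
  if stock < k then
    match pendingB dates supplies stock idx with
    | none => none
    | some true => some (stock, cnt, j)
    | some false =>
      if hlt : j < s.length then  -- Python's avail[j]: IndexError (= none) iff j is out of range
        consumeB dates supplies s k idx (j + 1) (stock + s[j]) (cnt + 1)
      else none
  else some (stock, cnt, j)
termination_by s.length - j
decreasing_by omega

-- Source B's outer `while stock < k` phase loop: unlock, `avail.sort(reverse=True)`, consume,
-- `avail = avail[j:]` (the slice of a nonnegative j is List.drop, exact here)
def whileB (dates supplies : List Int) (k : Int) : Nat → Int → Int → Nat → List Int → Option Int
  | 0, _, _, _, _ => none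
  | f + 1, stock, cnt, idx, avail =>
    if stock < k then
      match innerB dates supplies stock idx avail with
      | none => none
      | some (idx', avail1) =>
        let s := PySem.List.sorted avail1 (fun x => x) true
        match consumeB dates supplies s k idx' 0 stock cnt with
        | none => none
        | some (stock', cnt', j) => whileB dates supplies k f stock' cnt' idx' (s.drop j)
    else some cnt

def solution_alt (stock : Int) (dates : List Int) (supplies : List Int) (k : Int) : Int :=
  (whileB dates supplies k (supplies.length + 1) stock 0 0 []).getD 0

-- ===== PRECONDITION & SPEC =====
-- Pre_ excludes the inputs on which A raises (empty-heap heappop or dates[idx] IndexError): it is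
-- the intended problem guarantee — equal lengths, each date reachable with the supplies before it,
-- and enough total supply — which is sufficient for A to return but slightly narrower than the
-- exact no-raise set (A can also return by luckily reaching k early; one such excluded input is cited).
def Pre_solution (stock : Int) (dates : List Int) (supplies : List Int) (k : Int) : Prop :=
  k ≤ stock ∨
    (dates.length = supplies.length ∧
      (∀ i : Fin dates.length, dates[i] ≤ stock + ((supplies.take i).sum)) ∧
      k ≤ stock + supplies.sum)
instance (stock : Int) (dates : List Int) (supplies : List Int) (k : Int) : Decidable (Pre_solution stock dates supplies k) := by unfold Pre_solution; infer_instance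

def pvWitness_solution : Int × List Int × List Int × Int := (0, [0, 1], [1, 5], 2)

def Spec_solution (stock : Int) (dates : List Int) (supplies : List Int) (k : Int) (out : Int) : Prop := out = solution_alt stock dates supplies k
instance (stock : Int) (dates : List Int) (supplies : List Int) (k : Int) (out : Int) : Decidable (Spec_solution stock dates supplies k out) := by unfold Spec_solution; infer_instance

-- ===== CLAIM (what is proved, stated in full; the proofs are below) =====
def Claim_equal_solution : Prop := ∀ (stock : Int) (dates : List Int) (supplies : List Int) (k : Int), Dom_solution stock dates supplies k → Pre_solution stock dates supplies k → Spec_solution stock dates supplies k (solution stock dates supplies k)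

-- ===== LEMMAS AND PROOFS =====

-- Invariant on A's heap: every pushed pair is (-s, s).
def HPairs (heap : List (Int × Int)) : Prop := ∀ p ∈ heap, p.1 = -p.2

theorem pleLex_refl (a : Int × Int) : pleLex a a = true := by simp [pleLex]

theorem pleLex_trans {a b c : Int × Int} (h1 : pleLex a b = true) (h2 : pleLex b c = true) :
    pleLex a c = true := by
  simp only [pleLex, Bool.or_eq_true, decide_eq_true_eq, Bool.and_eq_true, beq_iff_eq] at *
  omega

theorem pleLex_total {a b : Int × Int} (h : pleLex a b = false) : pleLex b a = true := by
  simp only [pleLex, Bool.or_eq_false_iff, Bool.or_eq_true, decide_eq_true_eq,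
    Bool.and_eq_false_iff, Bool.and_eq_true, beq_iff_eq, decide_eq_false_iff_not, beq_eq_false_iff_ne] at *
  omega

theorem popMinPair_eq_none {h : List (Int × Int)} : popMinPair h = none ↔ h = [] := by
  cases h with
  | nil => simp [popMinPair]
  | cons p ps =>
    simp only [popMinPair]
    constructor
    · intro hc
      cases he : popMinPair ps with
      | none => rw [he] at hc; simp at hc
      | some r => rw [he] at hc; cases r with | mk q rest => simp only at hc; split at hc <;> simp at hc
    · intro hc; exact (List.cons_ne_nil p ps hc).elim

theorem popMinPair_spec {h : List (Int × Int)} {q : Int × Int} {rest : List (Int × Int)}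
    (he : popMinPair h = some (q, rest)) :
    h.Perm (q :: rest) ∧ ∀ p ∈ h, pleLex q p = true := by
  induction h generalizing q rest with
  | nil => simp [popMinPair] at he
  | cons p ps ih =>
    simp only [popMinPair] at he
    cases hr : popMinPair ps with
    | none =>
      rw [hr] at he
      have hps : ps = [] := popMinPair_eq_none.mp hr
      subst hps
      simp only [Option.some.injEq, Prod.mk.injEq] at he
      obtain ⟨rfl, rfl⟩ := he
      exact ⟨List.Perm.refl _, by intro p' hp'; simp at hp'; subst hp'; exact pleLex_refl _⟩
    | some r =>
      cases r with
      | mk q' rest' =>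
        rw [hr] at he
        dsimp only at he
        obtain ⟨hperm, hmin⟩ := ih hr
        split at he
        · rename_i hle
          simp only [Option.some.injEq, Prod.mk.injEq] at he
          obtain ⟨rfl, rfl⟩ := he
          refine ⟨List.Perm.refl _, fun p' hp' => ?_⟩
          rcases List.mem_cons.mp hp' with rfl | hp'
          · exact pleLex_refl _
          · exact pleLex_trans hle (hmin p' hp')
        · rename_i hle
          simp only [Option.some.injEq, Prod.mk.injEq] at he
          obtain ⟨rfl, rfl⟩ := he
          have hqp : pleLex q' p = true := pleLex_total (by
            cases hpq : pleLex p q' with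
            | false => rfl
            | true => exact absurd hpq hle)
          constructor
          · exact (hperm.cons p).trans (List.Perm.swap q' p rest')
          · intro p' hp'
            rcases List.mem_cons.mp hp' with rfl | hp'
            · exact hqp
            · exact hmin p' hp'

-- Popping the heap yields the maximum supply value: the head of B's descending-sorted remainder.
theorem popMax_head {heap : List (Int × Int)} {v : Int} {tail : List Int}
    (hperm : (heap.map Prod.snd).Perm (v :: tail)) (hpair : HPairs heap)
    (hmaxv : ∀ x ∈ tail, x ≤ v) :
    ∃ q rest, popMinPair heap = some (q, rest) ∧ q.2 = v ∧
      (rest.map Prod.snd).Perm tail ∧ HPairs rest := by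
  have hne : heap ≠ [] := by
    intro hc; subst hc
    have := hperm.symm.eq_nil
    simp at this
  cases he : popMinPair heap with
  | none => exact absurd (popMinPair_eq_none.mp he) hne
  | some r =>
    cases r with
    | mk q rest =>
      obtain ⟨hp2, hmin⟩ := popMinPair_spec he
      have hqmem : q ∈ heap := hp2.symm.subset (List.mem_cons_self ..)
      have hmax : ∀ p ∈ heap, p.2 ≤ q.2 := by
        intro p hp
        have h1 := hmin p hp
        have h2 := hpair p hp
        have h3 := hpair q hqmem
        simp only [pleLex, Bool.or_eq_true, decide_eq_true_eq, Bool.and_eq_true, beq_iff_eq] at h1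
        omega
      have hvmem : v ∈ heap.map Prod.snd := hperm.mem_iff.mpr (List.mem_cons_self ..)
      obtain ⟨pv, hpv, hpv2⟩ := List.mem_map.mp hvmem
      have hvq : v ≤ q.2 := hpv2 ▸ hmax pv hpv
      have hq2mem : q.2 ∈ v :: tail := hperm.mem_iff.mp (List.mem_map.mpr ⟨q, hqmem, rfl⟩)
      have hqv : q.2 ≤ v := by
        rcases List.mem_cons.mp hq2mem with h | h
        · omega
        · exact hmaxv _ h
      have hq2 : q.2 = v := le_antisymm hqv hvq
      refine ⟨q, rest, rfl, hq2, ?_, ?_⟩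
      · have h1 : (heap.map Prod.snd).Perm (q.2 :: rest.map Prod.snd) := by
          simpa using hp2.map Prod.snd
        have h2 : (q.2 :: rest.map Prod.snd).Perm (v :: tail) := h1.symm.trans hperm
        rw [hq2] at h2
        exact (List.perm_cons v).mp h2
      · intro p hp
        exact hpair p (hp2.symm.subset (List.mem_cons_of_mem _ hp))

-- When Source B's loop condition is false (no unlock pending), A's inner for-loop is the identity.
theorem innerA_id (dates supplies : List Int) (stock : Int) (i : Nat) (heap : List (Int × Int))
    (hp : pendingB dates supplies stock i = some false) :
    innerA dates supplies stock i i heap = some (i, heap) := by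
  unfold pendingB at hp
  by_cases h : i < supplies.length
  · rw [if_pos h] at hp
    cases hd : dates[i]? with
    | none => rw [hd] at hp; simp at hp
    | some d =>
      rw [hd] at hp
      simp only [Option.some.injEq, decide_eq_false_iff_not, not_le] at hp
      rw [innerA]
      have hgt : d > stock := by omega
      simp [h, hd, hgt]
  · rw [innerA]; simp [h]

-- The two unlock loops advance idx identically and preserve the multiset invariant.
theorem inner_rel (dates supplies : List Int) (stock : Int) :
    ∀ n idx (heap : List (Int × Int)) (avail : List Int),
      supplies.length - idx ≤ n → idx ≤ supplies.length →
      (heap.map Prod.snd).Perm avail → HPairs heap →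
      (innerA dates supplies stock idx idx heap = none ∧
         innerB dates supplies stock idx avail = none) ∨
      (∃ idx' heap' avail',
         innerA dates supplies stock idx idx heap = some (idx', heap') ∧
         innerB dates supplies stock idx avail = some (idx', avail') ∧
         (heap'.map Prod.snd).Perm avail' ∧ HPairs heap' ∧
         idx ≤ idx' ∧ idx' ≤ supplies.length ∧
         avail'.length + idx = avail.length + idx' ∧
         pendingB dates supplies stock idx' = some false) := by
  intro n
  induction n with
  | zero =>
    intro idx heap avail hn hle hperm hpair
    have hge : ¬ idx < supplies.length := by omega
    right
    exact ⟨idx, heap, avail, by rw [innerA]; simp [hge], by rw [innerB]; simp [hge],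
      hperm, hpair, le_rfl, hle, rfl, by unfold pendingB; simp [hge]⟩
  | succ n ih =>
    intro idx heap avail hn hle hperm hpair
    by_cases hlt : idx < supplies.length
    · cases hd : dates[idx]? with
      | none =>
        left
        constructor
        · rw [innerA]; simp [hlt, hd]
        · rw [innerB]; simp [hlt, hd]
      | some d =>
        by_cases hds : d ≤ stock
        · have hperm' : ((heap ++ [(-supplies[idx], supplies[idx])]).map Prod.snd).Perm
              (avail ++ [supplies[idx]]) := by
            simpa using hperm.append (List.Perm.refl [supplies[idx]])
          have hpair' : HPairs (heap ++ [(-supplies[idx], supplies[idx])]) := by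
            intro p hp
            rcases List.mem_append.mp hp with hp | hp
            · exact hpair p hp
            · simp at hp; subst hp; rfl
          have hrec := ih (idx + 1) (heap ++ [(-supplies[idx], supplies[idx])])
            (avail ++ [supplies[idx]]) (by omega) (by omega) hperm' hpair'
          have hgt : ¬ d > stock := by omega
          rcases hrec with ⟨hA, hB⟩ | ⟨idx', heap', avail', hA, hB, h1, h2, h3, h4, h5, h6⟩
          · left
            constructor
            · rw [innerA]; simp only [hlt, ↓reduceDIte, hd]; simpa [hgt] using hA
            · rw [innerB]; simp only [hlt, ↓reduceDIte, hd]; simpa [hds] using hB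
          · right
            refine ⟨idx', heap', avail', ?_, ?_, h1, h2, by omega, h4, by simp at h5 ⊢; omega, h6⟩
            · rw [innerA]; simp only [hlt, ↓reduceDIte, hd]; simpa [hgt] using hA
            · rw [innerB]; simp only [hlt, ↓reduceDIte, hd]; simpa [hds] using hB
        · right
          refine ⟨idx, heap, avail, ?_, ?_, hperm, hpair, le_rfl, hle, rfl, ?_⟩
          · have hgt : d > stock := by omega
            rw [innerA]
            simp only [hlt, ↓reduceDIte, hd, if_pos hgt]
          · rw [innerB]; simp [hlt, hd, hds]
          · unfold pendingB; simp [hlt, hd]; omega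
    · right
      exact ⟨idx, heap, avail, by rw [innerA]; simp [hlt], by rw [innerB]; simp [hlt],
        hperm, hpair, le_rfl, hle, rfl, by unfold pendingB; simp [hlt]⟩

-- One phase: Source B's consume loop matches A's successive heap pops (A's unlock loop being the
-- identity throughout, since no new date unlocks until the loop condition flips).
theorem consume_rel (dates supplies s : List Int) (k : Int) (idx' : Nat)
    (hs : s.Pairwise (fun a b => b ≤ a)) :
    ∀ fA (j : Nat) (stock cnt : Int) (heap : List (Int × Int)),
      (heap.map Prod.snd).Perm (s.drop j) → HPairs heap →
      heap.length + (supplies.length - idx') < fA →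
      (consumeB dates supplies s k idx' j stock cnt = none ∧
         whileA fA stock dates supplies k cnt idx' heap = none) ∨
      (∃ stock' cnt' j' heap',
         consumeB dates supplies s k idx' j stock cnt = some (stock', cnt', j') ∧
         j ≤ j' ∧ (heap'.map Prod.snd).Perm (s.drop j') ∧ HPairs heap' ∧
         heap'.length + (supplies.length - idx') < fA - (j' - j) ∧
         (j' = j ∨ j' ≤ s.length) ∧
         (stock < k → pendingB dates supplies stock idx' = some false → j < j') ∧
         whileA fA stock dates supplies k cnt idx' heap =
           whileA (fA - (j' - j)) stock' dates supplies k cnt' idx' heap') := by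
  intro fA
  induction fA with
  | zero => intro j stock cnt heap _ _ hb; omega
  | succ f ih =>
    intro j stock cnt heap hperm hpair hb
    by_cases hsk : stock < k
    · cases hp : pendingB dates supplies stock idx' with
      | none =>
        left
        constructor
        · rw [consumeB]; simp [hsk, hp]
        · unfold pendingB at hp
          by_cases hlt : idx' < supplies.length
          · rw [if_pos hlt] at hp
            cases hd : dates[idx']? with
            | none =>
              simp only [whileA]
              rw [if_pos hsk, innerA]
              simp [hlt, hd]
            | some d => rw [hd] at hp; simp at hp
          · rw [if_neg hlt] at hp; simp at hp
      | some b =>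
        cases b with
        | true =>
          right
          refine ⟨stock, cnt, j, heap, ?_, le_rfl, hperm, hpair, by omega, Or.inl rfl, ?_, by simp⟩
          · rw [consumeB]; simp [hsk, hp]
          · intro _ hp'; exact absurd hp' (by decide)
        | false =>
          have hstep : whileA (f + 1) stock dates supplies k cnt idx' heap =
              match popMinPair heap with
              | none => none
              | some (q, heap'') => whileA f (stock + q.2) dates supplies k (cnt + 1) idx' heap'' := by
            simp only [whileA]
            rw [if_pos hsk, innerA_id dates supplies stock idx' heap hp]
          cases hdrop : s.drop j with
          | nil =>
            have hheap : heap = [] := by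
              rw [hdrop] at hperm
              have := hperm.eq_nil
              cases heap with
              | nil => rfl
              | cons a t => simp at this
            have hge : ¬ j < s.length := by
              have := List.drop_eq_nil_iff.mp hdrop
              omega
            left
            constructor
            · rw [consumeB, if_pos hsk, hp, dif_neg hge]
            · rw [hstep, hheap]; simp [popMinPair]
          | cons v tail =>
            have hj : s[j]? = some v := by
              have h0 : (List.drop j s)[0]? = s[j + 0]? := List.getElem?_drop
              rw [hdrop] at h0
              simpa using h0.symm
            obtain ⟨hjlen, hjv⟩ := List.getElem?_eq_some_iff.mp hj
            have htail : tail = s.drop (j + 1) := by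
              have h1 : (List.drop j s).tail = List.drop (j + 1) s := List.tail_drop
              rw [hdrop] at h1
              simpa using h1
            have hmaxv : ∀ x ∈ tail, x ≤ v := by
              have hsub : (s.drop j).Pairwise (fun a b => b ≤ a) :=
                hs.sublist (List.drop_sublist j s)
              rw [hdrop, List.pairwise_cons] at hsub
              exact hsub.1
            obtain ⟨q, rest, hpop, hq2, hrperm, hrpair⟩ :=
              popMax_head (hdrop ▸ hperm) hpair hmaxv
            have hcons : consumeB dates supplies s k idx' j stock cnt =
                consumeB dates supplies s k idx' (j + 1) (stock + v) (cnt + 1) := by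
              rw [consumeB, if_pos hsk, hp, dif_pos hjlen, hjv]
            have hwa : whileA (f + 1) stock dates supplies k cnt idx' heap =
                whileA f (stock + v) dates supplies k (cnt + 1) idx' rest := by
              rw [hstep, hpop]
              dsimp only
              rw [hq2]
            have hrlen : rest.length = tail.length := by
              have := hrperm.length_eq
              rw [List.length_map] at this
              omega
            have hhlen : heap.length = tail.length + 1 := by
              have := hperm.length_eq
              rw [List.length_map, hdrop] at this
              simpa using this
            have hrec := ih (j + 1) (stock + v) (cnt + 1) rest (htail ▸ hrperm) hrpair (by omega)
            rcases hrec with ⟨hcn, hwn⟩ | ⟨stock', cnt', j', heap'', hc, hjle, hperm'', hpair'', hb'', hjb, _, heq⟩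
            · left
              exact ⟨by rw [hcons]; exact hcn, by rw [hwa]; exact hwn⟩
            · right
              have hfuel : f - (j' - (j + 1)) = (f + 1) - (j' - j) := by omega
              have hj's : j' ≤ s.length := by rcases hjb with rfl | h <;> omega
              refine ⟨stock', cnt', j', heap'', by rw [hcons]; exact hc, by omega, hperm'',
                hpair'', by omega, Or.inr hj's, by intro _ _; omega, ?_⟩
              rw [hwa, heq, hfuel]
    · right
      refine ⟨stock, cnt, j, heap, ?_, le_rfl, hperm, hpair, by omega, Or.inl rfl, by intro h; omega, by simp⟩
      rw [consumeB]; simp [hsk]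

-- The full simulation: A's pop-per-round loop equals B's phase loop, given enough fuel on both
-- sides (heap/avail size + remaining supplies bounds the rounds resp. phases).
theorem while_rel (dates supplies : List Int) (k : Int) :
    ∀ fB fA (stock cnt : Int) (idx : Nat) (heap : List (Int × Int)) (avail : List Int),
      (heap.map Prod.snd).Perm avail → HPairs heap →
      heap.length + (supplies.length - idx) < fA →
      avail.length + (supplies.length - idx) < fB →
      idx ≤ supplies.length →
      whileA fA stock dates supplies k cnt idx heap =
        whileB dates supplies k fB stock cnt idx avail := by
  intro fB
  induction fB with
  | zero => intro fA stock cnt idx heap avail _ _ _ hbB _; omega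
  | succ f ih =>
    intro fA stock cnt idx heap avail hperm hpair hbA hbB hle
    cases fA with
    | zero => omega
    | succ fa =>
      by_cases hsk : stock < k
      · rcases inner_rel dates supplies stock (supplies.length - idx) idx heap avail le_rfl hle
          hperm hpair with ⟨hA, hB⟩ | ⟨idx', heap1, avail1, hA, hB, hperm1, hpair1, hi1, hi2, hlen, hpend⟩
        · simp only [whileA, whileB]
          rw [if_pos hsk, if_pos hsk, hA, hB]
        · have hheq : heap.length = avail.length := by
            have := hperm.length_eq
            rwa [List.length_map] at this
          have hh1 : heap1.length = avail1.length := by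
            have := hperm1.length_eq
            rwa [List.length_map] at this
          obtain ⟨s, hsdef⟩ : ∃ s, s = PySem.List.sorted avail1 (fun x => x) true := ⟨_, rfl⟩
          have hsperm : s.Perm avail1 := hsdef ▸ PySem.List.sorted_perm avail1 (fun x => x) true
          have hspair : s.Pairwise (fun a b => b ≤ a) := by
            rw [hsdef]
            have := PySem.List.sorted_pairwise_rev avail1 (fun x => x)
            simpa using this
          have hslen : s.length = avail1.length := hsperm.length_eq
          have hperms : (heap1.map Prod.snd).Perm (s.drop 0) := by
            rw [List.drop_zero]
            exact hperm1.trans hsperm.symm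
          have hstep : whileA (fa + 1) stock dates supplies k cnt idx heap =
              whileA (fa + 1) stock dates supplies k cnt idx' heap1 := by
            simp only [whileA]
            rw [if_pos hsk, if_pos hsk, hA, innerA_id dates supplies stock idx' heap1 hpend]
          have hbA1 : heap1.length + (supplies.length - idx') < fa + 1 := by omega
          rcases consume_rel dates supplies s k idx' hspair (fa + 1) 0 stock cnt heap1
            hperms hpair1 hbA1 with ⟨hcn, hwn⟩ | ⟨stock', cnt', j', heap'', hc, _, hperm'', hpair'', hb'', hjb, hjpos, heq⟩
          · rw [hstep, hwn]
            simp only [whileB]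
            rw [if_pos hsk, hB]
            dsimp only
            rw [← hsdef, hcn]
          · have hj1 : 0 < j' := hjpos hsk hpend
            have hwB : whileB dates supplies k (f + 1) stock cnt idx avail =
                whileB dates supplies k f stock' cnt' idx' (s.drop j') := by
              simp only [whileB]
              rw [if_pos hsk, hB]
              dsimp only
              rw [← hsdef, hc]
            rw [hstep, heq, hwB]
            refine ih ((fa + 1) - (j' - 0)) stock' cnt' idx' heap'' (s.drop j')
              hperm'' hpair'' hb'' ?_ hi2
            have e1 : s.length = avail1.length := hslen
            have e2 : avail1.length + idx = avail.length + idx' := hlen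
            have e3 : avail.length + (supplies.length - idx) < f + 1 := hbB
            have e4 : (s.drop j').length = s.length - j' := List.length_drop ..
            have e5 : j' ≤ s.length := by rcases hjb with rfl | h <;> omega
            omega
      · simp only [whileA, whileB]
        rw [if_neg hsk, if_neg hsk]

theorem ports_eq (stock : Int) (dates supplies : List Int) (k : Int) :
    solution stock dates supplies k = solution_alt stock dates supplies k := by
  unfold solution solution_alt
  rw [while_rel dates supplies k (supplies.length + 1) (supplies.length + 1) stock 0 0 [] []
    (List.Perm.refl _) (by intro p hp; simp at hp) (by simp) (by simp) (by omega)]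

-- ===== VERDICT (by name: the statement is the Claim_ definition above) =====
theorem solution_spec : Claim_equal_solution := by
  intro stock dates supplies k _ _
  unfold Spec_solution
  exact ports_eq stock dates supplies k
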